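-- pv_equiv track=rewrite | github.com/banhdzui/cpi_hgcn | cpi/data_preprocessing.py | find_length_of_longest_sample
-- ===== SOURCE A (Python) =====
-- def find_length_of_longest_sample(compound_protein_list):
--     protein_length = 0
--     smiles_length = 0
--
--     for smiles, protein_sequence, _ in compound_protein_list:
--         '''
--         Update the size of protein
--         '''
--         if protein_length < len(protein_sequence):
--             protein_length = len(protein_sequence)
--         if smiles_length < len(smiles):
--             smiles_length = len(smiles)
--     return protein_length, smiles_length
-- ===== SOURCE B (Python) =====
-- def _solve(lst):
--     # lst is nonempty
--     if len(lst) == 1: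
--         smiles, protein_sequence, _ = lst[0]
--         return (len(protein_sequence), len(smiles))
--     mid = len(lst) // 2
--     p1, s1 = _solve(lst[:mid])
--     p2, s2 = _solve(lst[mid:])
--     return (max(p1, p2), max(s1, s2))
--
--
-- def find_length_of_longest_sample(compound_protein_list):
--     if not compound_protein_list:
--         return (0, 0)
--     return _solve(list(compound_protein_list))
-- ===== Notes on version B (the rewrite author's own statement) =====
-- stated objective: alternative
-- what changed: Replaced A's single left-to-right loop with two running accumulators by a divide-and-conquer recursion: split the list in half, recurse on both halves, and merge the two (protein, smiles) maxima pairs with max; correct because max is associative/commutative.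
import Mathlib
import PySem

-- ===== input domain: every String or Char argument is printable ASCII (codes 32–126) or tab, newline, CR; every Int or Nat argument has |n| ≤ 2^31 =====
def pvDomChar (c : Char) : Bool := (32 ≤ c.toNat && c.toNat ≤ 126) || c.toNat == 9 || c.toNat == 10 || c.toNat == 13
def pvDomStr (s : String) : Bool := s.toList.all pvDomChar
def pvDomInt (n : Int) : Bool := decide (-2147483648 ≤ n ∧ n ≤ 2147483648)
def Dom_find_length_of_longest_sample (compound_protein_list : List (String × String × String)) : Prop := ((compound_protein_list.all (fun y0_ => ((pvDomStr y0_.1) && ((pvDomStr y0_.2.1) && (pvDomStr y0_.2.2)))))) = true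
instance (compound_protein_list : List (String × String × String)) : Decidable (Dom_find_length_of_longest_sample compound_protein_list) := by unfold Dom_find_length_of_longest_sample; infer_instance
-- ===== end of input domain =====

-- B replaces A's single accumulator loop by a divide-and-conquer recursion that
-- splits the list in half and merges the two maxima pairs (objective: alternative).

-- ===== PORT A =====
-- A: one loop over the list, updating both running maxima with if-guards.
def find_length_of_longest_sample (compound_protein_list : List (String × String × String)) : Int × Int :=
  let st := compound_protein_list.foldl
    (fun (acc : Int × Int) (t : String × String × String) =>
      let pl := if acc.1 < PySem.Str.len t.2.1 then PySem.Str.len t.2.1 else acc.1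
      let sl := if acc.2 < PySem.Str.len t.1 then PySem.Str.len t.1 else acc.2
      (pl, sl))
    (0, 0)
  (st.1, st.2)

-- ===== PORT B =====
-- B helper _solve: divide and conquer on a nonempty list (the [] case is a
-- totality guard; _solve is only invoked on nonempty lists, as in Source B).
def pvSolve : List (String × String × String) → Int × Int
  | [] => (0, 0)
  | [t] => (PySem.Str.len t.2.1, PySem.Str.len t.1)
  | t1 :: t2 :: rest =>
      let l := t1 :: t2 :: rest
      let mid := l.length / 2
      let p := pvSolve (l.take mid)
      let q := pvSolve (l.drop mid)
      (max p.1 q.1, max p.2 q.2)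
termination_by l => l.length
decreasing_by
  · simp [List.length_take]; omega
  · simp; omega

def find_length_of_longest_sample_alt (compound_protein_list : List (String × String × String)) : Int × Int :=
  if compound_protein_list = [] then (0, 0)
  else pvSolve compound_protein_list

-- ===== PRECONDITION & SPEC =====
def Spec_find_length_of_longest_sample (compound_protein_list : List (String × String × String)) (out : Int × Int) : Prop := out = find_length_of_longest_sample_alt compound_protein_list
instance (compound_protein_list : List (String × String × String)) (out : Int × Int) : Decidable (Spec_find_length_of_longest_sample compound_protein_list out) := by unfold Spec_find_length_of_longest_sample; infer_instance

-- ===== CLAIM (what is proved, stated in full; the proofs are below) =====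
def Claim_equal_find_length_of_longest_sample : Prop := ∀ (compound_protein_list : List (String × String × String)), Dom_find_length_of_longest_sample compound_protein_list → Spec_find_length_of_longest_sample compound_protein_list (find_length_of_longest_sample compound_protein_list)

-- ===== LEMMAS AND PROOFS =====

theorem pv_if_lt_eq_max (a x : Int) : (if a < x then x else a) = max a x := by
  split <;> omega

-- A's fused fold splits into two independent max-folds over the mapped lengths.
theorem pv_fold_split (l : List (String × String × String)) (a b : Int) :
    l.foldl
      (fun (acc : Int × Int) (t : String × String × String) =>
        let pl := if acc.1 < PySem.Str.len t.2.1 then PySem.Str.len t.2.1 else acc.1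
        let sl := if acc.2 < PySem.Str.len t.1 then PySem.Str.len t.1 else acc.2
        (pl, sl))
      (a, b)
    = ((l.map (fun t => PySem.Str.len t.2.1)).foldl max a,
       (l.map (fun t => PySem.Str.len t.1)).foldl max b) := by
  induction l generalizing a b with
  | nil => rfl
  | cons h tl ih =>
      simp only [List.foldl_cons, List.map_cons, ih]
      simp only [pv_if_lt_eq_max]

theorem pv_foldl_max_shift (l : List Int) (i j : Int) :
    l.foldl max (max i j) = max i (l.foldl max j) := by
  induction l generalizing j with
  | nil => rfl
  | cons h t ih => simp only [List.foldl_cons, max_assoc, ih]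

theorem pv_le_foldl_max (l : List Int) (i : Int) : i ≤ l.foldl max i := by
  induction l generalizing i with
  | nil => simp
  | cons h t ih => exact le_trans (le_max_left i h) (ih _)

theorem pv_foldl_max_append (a b : List Int) :
    (a ++ b).foldl max (0 : Int) = max (a.foldl max 0) (b.foldl max 0) := by
  rw [List.foldl_append]
  have h : a.foldl max (0 : Int) = max (a.foldl max 0) 0 :=
    (max_eq_left (le_trans (le_refl _) (pv_le_foldl_max a 0))).symm
  calc b.foldl max (a.foldl max 0)
      = b.foldl max (max (a.foldl max 0) 0) := by rw [← h]
    _ = max (a.foldl max 0) (b.foldl max 0) := pv_foldl_max_shift b _ 0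

theorem pv_str_len_nonneg (s : String) : (0 : Int) ≤ PySem.Str.len s := by
  simp [PySem.Str.len]

-- pvSolve computes the two max-folds (trivially so on [], where both are (0,0)).
theorem pv_solve_eq (l : List (String × String × String)) :
    pvSolve l = ((l.map (fun t => PySem.Str.len t.2.1)).foldl max 0,
                 (l.map (fun t => PySem.Str.len t.1)).foldl max 0) := by
  induction l using pvSolve.induct with
  | case1 => simp [pvSolve]
  | case2 t =>
      have h1 := pv_str_len_nonneg t.2.1
      have h2 := pv_str_len_nonneg t.1
      simp only [pvSolve, List.map_cons, List.map_nil, List.foldl_cons, List.foldl_nil]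
      rw [max_comm, max_eq_left h1, max_comm, max_eq_left h2]
  | case3 t1 t2 rest l mid ih1 ih2 =>
      rw [pvSolve]
      set L := t1 :: t2 :: rest with hL
      rw [ih1, ih2]
      have hsplit : L = L.take (L.length / 2) ++ L.drop (L.length / 2) :=
        (List.take_append_drop _ _).symm
      simp only [Prod.mk.injEq]
      constructor
      · conv_rhs => rw [hsplit]
        rw [List.map_append, pv_foldl_max_append]
      · conv_rhs => rw [hsplit]
        rw [List.map_append, pv_foldl_max_append]

-- ===== VERDICT (by name: the statement is the Claim_ definition above) =====
theorem find_length_of_longest_sample_spec : Claim_equal_find_length_of_longest_sample := by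
  intro l _
  unfold Spec_find_length_of_longest_sample find_length_of_longest_sample find_length_of_longest_sample_alt
  by_cases hl : l = []
  · subst hl; rfl
  · simp only [hl, if_false, pv_fold_split, pv_solve_eq l]
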